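-- pv_equiv track=rewrite | github.com/retromorph/advanced-algorithms | notebooks/tmp2.py | inv_mod2
-- ===== SOURCE A (Python) =====
-- def inv_mod2(lst):
--     if len(lst) <= 1:
--         return lst, 0
--
--     mid = len(lst) // 2
--     left, inv_l = inv_mod2(lst[:mid])
--     right, inv_r = inv_mod2(lst[mid:])
--     merged, inv = [], inv_l ^ inv_r
--     i = j = 0
--     while i < len(left) and j < len(right):
--         if left[i] <= right[j]:
--             merged.append(left[i]); i += 1
--         else:
--             merged.append(right[j])
--             inv ^= (len(left) - i) & 1
--             j += 1
--
--     merged.extend(left[i:])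
--     merged.extend(right[j:])
--     return merged, inv
-- ===== SOURCE B (Python) =====
-- def inv_mod2(lst):
--     p = 0
--     rest = lst
--     while rest:
--         x, rest = rest[0], rest[1:]
--         for y in rest:
--             if x > y:
--                 p ^= 1
--     return sorted(lst), p
-- ===== Notes on version B (the rewrite author's own statement) =====
-- stated objective: simpler
-- what changed: Replaces the recursive merge sort that threads inversion parity through the merge with a library sorted() call plus a direct double scan that XORs the parity for each out-of-order pair.
import Mathlib
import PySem

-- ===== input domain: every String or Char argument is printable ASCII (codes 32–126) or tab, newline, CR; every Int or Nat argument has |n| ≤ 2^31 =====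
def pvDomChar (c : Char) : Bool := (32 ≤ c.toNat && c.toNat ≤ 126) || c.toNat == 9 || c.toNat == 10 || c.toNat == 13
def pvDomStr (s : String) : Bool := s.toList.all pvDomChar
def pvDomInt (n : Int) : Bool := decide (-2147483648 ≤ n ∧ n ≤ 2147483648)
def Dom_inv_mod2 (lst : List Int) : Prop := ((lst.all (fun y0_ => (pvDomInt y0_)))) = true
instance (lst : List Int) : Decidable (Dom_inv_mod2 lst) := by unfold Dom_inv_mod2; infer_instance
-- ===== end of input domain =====

-- B replaces A's merge sort threading inversion parity through the merge by a library sort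
-- plus a direct pairwise scan XORing the parity for each out-of-order pair (simpler, not faster).

-- ===== PORT A =====
-- the while-loop of A, on the remaining parts of left/right (left[i:], right[j:]) together with
-- the accumulated `merged` and `inv`; `(x :: l).length` is Python's `len(left) - i`
def pvMergeA : List Int → List Int → List Int → Int → List Int × Int
  | x :: l, y :: r, merged, inv =>
    if x ≤ y then pvMergeA l (y :: r) (merged ++ [x]) inv
    else pvMergeA (x :: l) r (merged ++ [y])
           (PySem.Int.bxor inv (PySem.Int.band ((x :: l).length : Int) 1))
  | l, r, merged, inv => (merged ++ l ++ r, inv)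
  termination_by l r _ _ => l.length + r.length

def inv_mod2 (lst : List Int) : List Int × Int :=
  if lst.length ≤ 1 then (lst, 0)
  else
    -- mid = len(lst) // 2: Nat division equals Python's // on the nonnegative length
    let mid := lst.length / 2
    let p := inv_mod2 (lst.take mid)        -- lst[:mid]
    let q := inv_mod2 (lst.drop mid)        -- lst[mid:]
    pvMergeA p.1 q.1 [] (PySem.Int.bxor p.2 q.2)
  termination_by lst.length
  decreasing_by
  · simp only [List.length_take]; omega
  · simp only [List.length_drop]; omega

-- ===== PORT B =====
-- inner `for y in rest:` loop
def pvInnerB (x : Int) (rest : List Int) (p : Int) : Int :=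
  rest.foldl (fun p y => if x > y then PySem.Int.bxor p 1 else p) p

-- `while rest:` loop; x, rest = rest[0], rest[1:]
def pvOuterB : List Int → Int → Int
  | [], p => p
  | x :: rest, p => pvOuterB rest (pvInnerB x rest p)

def inv_mod2_alt (lst : List Int) : List Int × Int :=
  (PySem.List.sorted lst (fun v => v), pvOuterB lst 0)

-- ===== PRECONDITION & SPEC =====
def Spec_inv_mod2 (lst : List Int) (out : List Int × Int) : Prop := out = inv_mod2_alt lst
instance (lst : List Int) (out : List Int × Int) : Decidable (Spec_inv_mod2 lst out) := by unfold Spec_inv_mod2; infer_instance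

-- ===== CLAIM (what is proved, stated in full; the proofs are below) =====
def Claim_equal_inv_mod2 : Prop := ∀ (lst : List Int), Dom_inv_mod2 lst → Spec_inv_mod2 lst (inv_mod2 lst)

-- ===== LEMMAS AND PROOFS =====

-- parity of a count, as the Int both programs carry
def pvPar (n : Nat) : Int := ((n % 2 : Nat) : Int)

-- number of inversions of a list
def pvInv : List Int → Nat
  | [] => 0
  | x :: xs => xs.countP (fun y => decide (y < x)) + pvInv xs

-- number of cross inversions between two lists
def pvCross (l r : List Int) : Nat := (l.map (fun x => r.countP (fun y => decide (y < x)))).sum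

lemma bxor_par_par (a b : Nat) : PySem.Int.bxor (pvPar a) (pvPar b) = pvPar (a + b) := by
  unfold pvPar
  rw [PySem.Int.bxor_natCast]
  rcases Nat.mod_two_eq_zero_or_one a with ha | ha <;>
    rcases Nat.mod_two_eq_zero_or_one b with hb | hb <;>
    rw [ha, hb] <;> simp [Nat.add_mod, ha, hb]

lemma band_cast_one (n : Nat) : PySem.Int.band (n : Int) 1 = pvPar n := by
  rw [PySem.Int.band_one]
  exact_mod_cast PySem.Int.mod_natCast n 2

lemma pvCross_nil_right (l : List Int) : pvCross l [] = 0 := by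
  simp [pvCross]

lemma pvCross_cons_right (l r : List Int) (y : Int) (h : ∀ z ∈ l, y < z) :
    pvCross l (y :: r) = pvCross l r + l.length := by
  induction l with
  | nil => simp [pvCross]
  | cons z l ih =>
    have hyz : y < z := h z (by simp)
    simp only [pvCross, List.map_cons, List.sum_cons, List.countP_cons, List.length_cons] at *
    rw [ih (fun w hw => h w (by simp [hw]))]
    simp [hyz]
    omega

lemma pvInv_append (l r : List Int) : pvInv (l ++ r) = pvInv l + pvCross l r + pvInv r := by
  induction l with
  | nil => simp [pvInv, pvCross]
  | cons x l ih =>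
    simp only [List.cons_append, pvInv, pvCross, List.map_cons, List.sum_cons,
      List.countP_append] at *
    omega

lemma pvCross_perm (l l' r r' : List Int) (h1 : l.Perm l') (h2 : r.Perm r') :
    pvCross l r = pvCross l' r' := by
  unfold pvCross
  rw [show (l.map (fun x => r.countP (fun y => decide (y < x))))
        = (l.map (fun x => r'.countP (fun y => decide (y < x)))) from
      List.map_congr_left (fun x _ => h2.countP_eq _)]
  exact ((h1.map _).sum_eq)

lemma pvMergeA_spec : ∀ (l r : List Int), l.Pairwise (· ≤ ·) → r.Pairwise (· ≤ ·) →
    ∀ (merged : List Int) (a : Nat),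
    pvMergeA l r merged (pvPar a)
      = (merged ++ List.merge l r (fun x y => decide (x ≤ y)), pvPar (a + pvCross l r)) := by
  intro l
  induction l with
  | nil =>
    intro r _ _ merged a
    simp [pvMergeA, pvCross]
  | cons x l ihl =>
    intro r
    induction r with
    | nil =>
      intro _ _ merged a
      simp [pvMergeA, pvCross_nil_right]
    | cons y r ihr =>
      intro hl hr merged a
      simp only [pvMergeA]
      by_cases hxy : x ≤ y
      · rw [if_pos hxy, ihl (y :: r) hl.tail hr (merged ++ [x]) a]
        have hcnt : (y :: r).countP (fun z => decide (z < x)) = 0 := by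
          rw [List.countP_eq_zero]
          intro b hb
          have hyb : y ≤ b := by
            rcases List.mem_cons.mp hb with hb | hb
            · exact le_of_eq hb.symm
            · exact (List.pairwise_cons.mp hr).1 b hb
          simp only [decide_eq_true_eq]
          omega
        have hcross : pvCross (x :: l) (y :: r) = pvCross l (y :: r) := by
          simp [pvCross, hcnt]
        rw [hcross, List.merge]
        simp [hxy]
      · rw [if_neg hxy, band_cast_one, bxor_par_par,
          ihr hl hr.tail (merged ++ [y]) (a + (x :: l).length)]
        have hlt : ∀ z ∈ x :: l, y < z := by
          intro z hz
          rcases List.mem_cons.mp hz with hz | hz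
          · omega
          · have := (List.pairwise_cons.mp hl).1 z hz
            omega
        rw [pvCross_cons_right _ _ _ hlt, List.merge]
        simp only [decide_eq_true_eq, hxy, if_false]
        rw [Prod.mk.injEq]
        exact ⟨by simp, by congr 1; omega⟩

lemma pvInnerB_spec (x : Int) : ∀ (rest : List Int) (a : Nat),
    pvInnerB x rest (pvPar a) = pvPar (a + rest.countP (fun y => decide (y < x))) := by
  intro rest
  induction rest with
  | nil => intro a; simp [pvInnerB]
  | cons y rest ih =>
    intro a
    simp only [pvInnerB, List.foldl_cons] at *
    by_cases hyx : y < x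
    · have hgt : x > y := hyx
      rw [if_pos hgt]
      have h1 : PySem.Int.bxor (pvPar a) 1 = pvPar (a + 1) := bxor_par_par a 1
      rw [h1, ih (a + 1)]
      congr 1
      simp [hyx]
      omega
    · have hgt : ¬ x > y := hyx
      rw [if_neg hgt, ih a]
      congr 1
      simp [hyx]

lemma pvOuterB_spec : ∀ (lst : List Int) (a : Nat),
    pvOuterB lst (pvPar a) = pvPar (a + pvInv lst) := by
  intro lst
  induction lst with
  | nil => intro a; simp [pvOuterB, pvInv]
  | cons x rest ih =>
    intro a
    rw [pvOuterB, pvInnerB_spec, ih]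
    congr 1
    simp [pvInv]
    omega

lemma inv_mod2_main (n : Nat) : ∀ lst : List Int, lst.length = n →
    (inv_mod2 lst).1.Perm lst ∧ (inv_mod2 lst).1.Pairwise (· ≤ ·)
      ∧ (inv_mod2 lst).2 = pvPar (pvInv lst) := by
  induction n using Nat.strong_induction_on with
  | _ n ih =>
    intro lst hlen
    by_cases hsmall : lst.length ≤ 1
    · rw [inv_mod2, if_pos hsmall]
      rcases lst with _ | ⟨x, _ | ⟨y, t⟩⟩
      · exact ⟨List.Perm.refl _, by simp, by simp [pvInv, pvPar]⟩
      · exact ⟨List.Perm.refl _, by simp, by simp [pvInv, pvPar]⟩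
      · simp at hsmall
    · rw [inv_mod2, if_neg hsmall]
      have h1 : (lst.take (lst.length / 2)).length < n := by
        simp only [List.length_take]; omega
      have h2 : (lst.drop (lst.length / 2)).length < n := by
        simp only [List.length_drop]; omega
      obtain ⟨pL, sL, iL⟩ := ih _ h1 _ rfl
      obtain ⟨pR, sR, iR⟩ := ih _ h2 _ rfl
      simp only [iL, iR, bxor_par_par, pvMergeA_spec _ _ sL sR, List.nil_append]
      refine ⟨?_, ?_, ?_⟩
      · exact (List.merge_perm_append _).trans
          ((pL.append pR).trans (by rw [List.take_append_drop]))
      · exact List.Pairwise.merge sL sR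
      · congr 1
        have hc : pvCross (inv_mod2 (lst.take (lst.length / 2))).1
            (inv_mod2 (lst.drop (lst.length / 2))).1
            = pvCross (lst.take (lst.length / 2)) (lst.drop (lst.length / 2)) :=
          pvCross_perm _ _ _ _ pL pR
        have hsplit := pvInv_append (lst.take (lst.length / 2)) (lst.drop (lst.length / 2))
        rw [List.take_append_drop] at hsplit
        omega

-- ===== VERDICT (by name: the statement is the Claim_ definition above) =====
theorem inv_mod2_spec : Claim_equal_inv_mod2 := by
  intro lst _
  unfold Spec_inv_mod2 inv_mod2_alt
  obtain ⟨hperm, hpair, hinv⟩ := inv_mod2_main lst.length lst rfl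
  have hs : PySem.List.sorted lst (fun v => v) = (inv_mod2 lst).1 :=
    PySem.List.sorted_id_eq_of_perm_of_pairwise lst _ hperm hpair
  have hp : pvOuterB lst 0 = pvPar (pvInv lst) := by
    simpa using pvOuterB_spec lst 0
  rw [hs, hp, ← hinv]
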